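-- pv_equiv track=rewrite | github.com/juanfe2703/BOT-D-D | cogs/admin_npcs.py | _parsear_precio
-- ===== SOURCE A (Python) =====
-- def _parsear_precio(args: list[str]) -> tuple[int, int, int] | None:
--     """Parsea una lista de strings tipo ['5o', '3p', '10c'] → (cobre, plata, oro)."""
--     cobre = plata = oro = 0
--     for arg in args:
--         arg = arg.lower().strip()
--         try:
--             if arg.endswith("o"):
--                 oro   = int(arg[:-1])
--             elif arg.endswith("p"):
--                 plata = int(arg[:-1])
--             elif arg.endswith("c"):
--                 cobre = int(arg[:-1])
--             else:
--                 return None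
--         except ValueError:
--             return None
--     return cobre, plata, oro
-- ===== SOURCE B (Python) =====
-- _SUFIJOS = ('c', 'p', 'o')
--
--
-- def _es_valido(tok):
--     """True iff an already-normalised token is a coin amount: known suffix + int prefix."""
--     if tok[-1:] not in _SUFIJOS:
--         return False
--     try:
--         int(tok[:-1])
--         return True
--     except ValueError:
--         return False
--
--
-- def _parsear_precio(args: list[str]) -> tuple[int, int, int] | None:
--     """Parsea una lista de strings tipo ['5o', '3p', '10c'] → (cobre, plata, oro)."""
--     toks = [a.lower().strip() for a in args]
--     if not all(map(_es_valido, toks)):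
--         return None
--
--     def monto(suf):
--         # last token carrying this suffix wins; absent coin defaults to 0
--         return next((int(t[:-1]) for t in reversed(toks) if t[-1:] == suf), 0)
--
--     return monto('c'), monto('p'), monto('o')
-- ===== Notes on version B (the rewrite author's own statement) =====
-- stated objective: alternative
-- what changed: B keeps no running coin state at all: it normalises the tokens, checks them all for validity in one all() pass, and then computes each coin independently by a reverse search for the last token carrying that suffix, parsing only the (up to three) winning tokens.
import Mathlib
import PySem

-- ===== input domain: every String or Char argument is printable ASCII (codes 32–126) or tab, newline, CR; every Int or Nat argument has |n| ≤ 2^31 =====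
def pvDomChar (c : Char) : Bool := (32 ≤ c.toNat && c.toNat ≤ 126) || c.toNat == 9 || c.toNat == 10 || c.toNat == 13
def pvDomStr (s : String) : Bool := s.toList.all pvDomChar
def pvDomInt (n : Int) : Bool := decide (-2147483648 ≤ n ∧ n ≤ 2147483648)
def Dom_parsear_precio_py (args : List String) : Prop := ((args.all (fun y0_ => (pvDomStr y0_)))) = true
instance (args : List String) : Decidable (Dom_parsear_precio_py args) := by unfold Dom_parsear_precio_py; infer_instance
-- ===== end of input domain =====

-- B keeps no running coin state: it normalises the tokens, validates them all in one pass,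
-- then computes each coin independently as the last token with that suffix via a reverse
-- search (objective: alternative; same O(n) cost).

-- ===== PORT A =====
-- one iteration of A's for-loop over the state (cobre, plata, oro); none = the early 'return None'
def pvStepA (st : Option (Int × Int × Int)) (a : String) : Option (Int × Int × Int) :=
  match st with
  | none => none
  | some (cobre, plata, oro) =>
    let arg := PySem.Str.strip (PySem.Str.lower a)
    if PySem.Str.endswith arg "o" then
      match PySem.Int.ofStr? (PySem.Str.slice arg none (some (-1))) with
      | none => none                    -- ValueError → return None
      | some v => some (cobre, plata, v)
    else if PySem.Str.endswith arg "p" then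
      match PySem.Int.ofStr? (PySem.Str.slice arg none (some (-1))) with
      | none => none
      | some v => some (cobre, v, oro)
    else if PySem.Str.endswith arg "c" then
      match PySem.Int.ofStr? (PySem.Str.slice arg none (some (-1))) with
      | none => none
      | some v => some (v, plata, oro)
    else none

def parsear_precio_py (args : List String) : Option (Int × Int × Int) :=
  args.foldl pvStepA (some (0, 0, 0))

-- ===== PORT B =====
-- the listcomp's body: a.lower().strip()
def pvNorm (a : String) : String := PySem.Str.strip (PySem.Str.lower a)
-- tok[-1:] and int(tok[:-1]) on a normalised token
def pvSuf (tok : String) : String := PySem.Str.slice tok (some (-1)) none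
def pvNum (tok : String) : Option Int := PySem.Int.ofStr? (PySem.Str.slice tok none (some (-1)))

-- Source B's _es_valido: known suffix and int(tok[:-1]) parses (isSome = the try succeeds)
def pvValido (tok : String) : Bool :=
  decide (pvSuf tok ∈ (["c", "p", "o"] : List String)) && (pvNum tok).isSome

-- Source B's monto(suf): reverse search for the last token with this suffix, parse it, default 0.
-- (.getD 0 encodes int(t[:-1]) totally; under B's all-valid guard the found token always parses.)
def pvMonto (toks : List String) (suf : String) : Int :=
  match toks.reverse.find? (fun t => pvSuf t == suf) with
  | none => 0
  | some t => (pvNum t).getD 0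

def parsear_precio_py_alt (args : List String) : Option (Int × Int × Int) :=
  let toks := args.map pvNorm
  if toks.all pvValido then
    some (pvMonto toks "c", pvMonto toks "p", pvMonto toks "o")
  else none

-- ===== PRECONDITION & SPEC =====
def Spec_parsear_precio_py (args : List String) (out : Option (Int × Int × Int)) : Prop := out = parsear_precio_py_alt args
instance (args : List String) (out : Option (Int × Int × Int)) : Decidable (Spec_parsear_precio_py args out) := by unfold Spec_parsear_precio_py; infer_instance

-- ===== CLAIM (what is proved, stated in full; the proofs are below) =====
def Claim_equal_parsear_precio_py : Prop := ∀ (args : List String), Dom_parsear_precio_py args → Spec_parsear_precio_py args (parsear_precio_py args)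

-- ===== LEMMAS AND PROOFS =====

set_option maxHeartbeats 1600000

-- pvMonto with an arbitrary default, to state the loop invariant
def pvMontoD (toks : List String) (suf : String) (d : Int) : Int :=
  match toks.reverse.find? (fun t => pvSuf t == suf) with
  | none => d
  | some t => (pvNum t).getD 0

lemma pvString_eq_iff (s t : String) : s = t ↔ s.toList = t.toList := by
  constructor
  · intro h; rw [h]
  · intro h; exact String.toList_inj.mp h

lemma pvEndswith_concat (l : List Char) (ch x : Char) :
    PySem.Chars.endswith (l ++ [ch]) [x] = true ↔ ch = x := by
  rw [PySem.Chars.endswith_iff]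
  constructor
  · rintro ⟨t, ht⟩
    have := List.append_inj' ht rfl
    simpa using this.2.symm
  · rintro rfl; exact ⟨l, rfl⟩

lemma pvNoneA (args : List String) : args.foldl pvStepA none = none := by
  induction args with
  | nil => rfl
  | cons a rest ih => simpa [pvStepA] using ih

lemma pvMontoD_cons (tok : String) (ts : List String) (suf : String) (d : Int) :
    pvMontoD (tok :: ts) suf d =
      pvMontoD ts suf (if pvSuf tok = suf then (pvNum tok).getD 0 else d) := by
  simp only [pvMontoD, List.reverse_cons, List.find?_append]
  cases h : ts.reverse.find? (fun t => pvSuf t == suf) with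
  | some t => simp
  | none =>
    simp only [Option.none_or, List.find?_cons]
    by_cases hk : pvSuf tok = suf
    · simp [hk]
    · have hb : (pvSuf tok == suf) = false := by simp [hk]
      simp [hb, hk]

-- the core simulation: A's accumulator triple equals B's last-occurrence reads
lemma pvSim (args : List String) : ∀ t : Int × Int × Int,
    args.foldl pvStepA (some t) =
      (if (args.map pvNorm).all pvValido then
        some (pvMontoD (args.map pvNorm) "c" t.1, pvMontoD (args.map pvNorm) "p" t.2.1,
              pvMontoD (args.map pvNorm) "o" t.2.2)
      else none) := by
  induction args with
  | nil => intro t; rfl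
  | cons a rest ih =>
    intro t
    obtain ⟨c, p, o⟩ := t
    simp only [List.foldl_cons, List.map_cons, List.all_cons, pvStepA]
    set s := pvNorm a with hs
    simp only [show PySem.Str.strip (PySem.Str.lower a) = s from rfl]
    have hnum : PySem.Int.ofStr? (PySem.Str.slice s none (some (-1))) = pvNum s := rfl
    rcases List.eq_nil_or_concat s.toList with h0 | ⟨l', ch, hcat⟩
    · -- empty token: every endswith test is false and the suffix slice is "", so both sides are none
      have hend : ∀ (xs : String) (x : Char), xs.toList = [x] → PySem.Str.endswith s xs = false := by
        intro xs x hxs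
        rw [PySem.Str.endswith_eq, h0, hxs]
        cases hb : PySem.Chars.endswith [] [x]
        · rfl
        · exfalso
          have := (PySem.Chars.endswith_iff [] [x]).mp hb
          cases List.suffix_nil.mp this
      have hsuf : pvSuf s ∉ (["c", "p", "o"] : List String) := by
        intro hmem
        have hl : (pvSuf s).toList = [] := by
          simp [pvSuf, PySem.Str.toList_slice, h0, PySem.Chars.slice_eq_listSlice,
            PySem.List.slice_from_neg_one]
        simp only [List.mem_cons, List.not_mem_nil, or_false] at hmem
        rcases hmem with h | h | h
        · rw [pvString_eq_iff, hl] at h; cases h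
        · rw [pvString_eq_iff, hl] at h; cases h
        · rw [pvString_eq_iff, hl] at h; cases h
      have hv : pvValido s = false := by
        simp [pvValido, hsuf]
      rw [hend "o" 'o' rfl, hend "p" 'p' rfl, hend "c" 'c' rfl, hv]
      simp [pvNoneA]
    · -- token's last character is ch
      rw [List.concat_eq_append] at hcat
      have hsufl : (pvSuf s).toList = [ch] := by
        simp [pvSuf, PySem.Str.toList_slice, hcat, PySem.Chars.slice_eq_listSlice,
          PySem.List.slice_from_neg_one]
      have hendT : ∀ (xs : String) (x : Char), xs.toList = [x] → ch = x →
          PySem.Str.endswith s xs = true := by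
        intro xs x hxs hx
        rw [PySem.Str.endswith_eq, hcat, hxs]
        exact (pvEndswith_concat l' ch x).mpr hx
      have hendF : ∀ (xs : String) (x : Char), xs.toList = [x] → ch ≠ x →
          PySem.Str.endswith s xs = false := by
        intro xs x hxs hx
        rw [PySem.Str.endswith_eq, hcat, hxs]
        cases hb : PySem.Chars.endswith (l' ++ [ch]) [x]
        · rfl
        · exact absurd ((pvEndswith_concat l' ch x).mp hb) hx
      by_cases hcho : ch = 'o'
      · subst hcho
        have hso : pvSuf s = "o" := by rw [pvString_eq_iff, hsufl]; rfl
        rw [hendT "o" 'o' rfl rfl, if_pos rfl, hnum]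
        cases hof : pvNum s with
        | none =>
          have hv : pvValido s = false := by simp [pvValido, hof]
          rw [hv]
          simp [pvNoneA]
        | some v =>
          have hv : pvValido s = true := by simp [pvValido, hof, hso]
          rw [hv, ih (c, p, v)]
          have hgd : (pvNum s).getD 0 = v := by rw [hof]; rfl
          by_cases hall : ((rest.map pvNorm).all pvValido) = true
          · simp only [hall, Bool.true_and, pvMontoD_cons, hso, hgd,
              (by decide : ¬("o":String) = "c"), (by decide : ¬("o":String) = "p"),
              reduceIte]
          · simp only [Bool.true_and, hall]
            simp
      · by_cases hchp : ch = 'p'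
        · subst hchp
          have hso : pvSuf s = "p" := by rw [pvString_eq_iff, hsufl]; rfl
          rw [hendF "o" 'o' rfl hcho, hendT "p" 'p' rfl rfl, hnum]
          simp only [Bool.false_eq_true, if_false, if_true]
          cases hof : pvNum s with
          | none =>
            have hv : pvValido s = false := by simp [pvValido, hof]
            rw [hv]
            simp [pvNoneA]
          | some v =>
            have hv : pvValido s = true := by simp [pvValido, hof, hso]
            rw [hv, ih (c, v, o)]
            have hgd : (pvNum s).getD 0 = v := by rw [hof]; rfl
            by_cases hall : ((rest.map pvNorm).all pvValido) = true
            · simp only [hall, Bool.true_and, pvMontoD_cons, hso, hgd,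
                (by decide : ¬("p":String) = "c"), (by decide : ¬("p":String) = "o"),
                reduceIte]
            · simp only [Bool.true_and, hall]
              simp
        · by_cases hchc : ch = 'c'
          · subst hchc
            have hso : pvSuf s = "c" := by rw [pvString_eq_iff, hsufl]; rfl
            rw [hendF "o" 'o' rfl hcho, hendF "p" 'p' rfl hchp, hendT "c" 'c' rfl rfl, hnum]
            simp only [Bool.false_eq_true, if_false, if_true]
            cases hof : pvNum s with
            | none =>
              have hv : pvValido s = false := by simp [pvValido, hof]
              rw [hv]
              simp [pvNoneA]
            | some v =>
              have hv : pvValido s = true := by simp [pvValido, hof, hso]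
              rw [hv, ih (v, p, o)]
              have hgd : (pvNum s).getD 0 = v := by rw [hof]; rfl
              by_cases hall : ((rest.map pvNorm).all pvValido) = true
              · simp only [hall, Bool.true_and, pvMontoD_cons, hso, hgd,
                  (by decide : ¬("c":String) = "p"), (by decide : ¬("c":String) = "o"),
                  reduceIte]
              · simp only [Bool.true_and, hall]
                simp
          · -- unknown suffix: both sides none
            have hsuf : pvSuf s ∉ (["c", "p", "o"] : List String) := by
              intro hmem
              simp only [List.mem_cons, List.not_mem_nil, or_false] at hmem
              rcases hmem with h | h | h
              · rw [pvString_eq_iff, hsufl] at h; simp at h; exact hchc h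
              · rw [pvString_eq_iff, hsufl] at h; simp at h; exact hchp h
              · rw [pvString_eq_iff, hsufl] at h; simp at h; exact hcho h
            have hv : pvValido s = false := by simp [pvValido, hsuf]
            rw [hendF "o" 'o' rfl hcho, hendF "p" 'p' rfl hchp, hendF "c" 'c' rfl hchc, hv]
            simp [pvNoneA]

-- ===== VERDICT (by name: the statement is the Claim_ definition above) =====
theorem parsear_precio_py_spec : Claim_equal_parsear_precio_py := by
  intro args _
  show parsear_precio_py args = parsear_precio_py_alt args
  rw [parsear_precio_py, parsear_precio_py_alt, pvSim]
  by_cases hall : ((args.map pvNorm).all pvValido) = true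
  · simp only [hall, if_true]
    rfl
  · simp [Bool.eq_false_iff.mpr hall]
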